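-- pv_equiv track=rewrite | github.com/lukematheny/cipherUI | cipher_funcs/dvorak_funcs.py | encipher_dvorak
-- ===== SOURCE A (Python) =====
-- def encipher_dvorak(message, layers=1):
--
--     '''
--     encipher_dvorak(message, layers=1)
--
--     The message is converted from the QWERTY keyboard to the Dvorak keyboard
--     using the same key placements, done over the number of layers.
--
--     Arguments:
--     message -- Message being enciphered
--     layers -- How many times the message is enciphered QWERTY to Dvorak
--
--     Steps:
--     1. Layers is put equal to layers modulo 210, as 210 is when the cipher
--        repeats itself.
--     2. Each message letter found in the QWERTY keyboard is set to the Dvorak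
--        keyboard, and put in the cipher.
--     3. Step 2 is done as many times as there are layers, with each previous
--        cipher as the new message.
--
--     QWERTY keyboard:_______________
--     │                              │
--     │ ` 1 2 3 4 5 6 7 8 9 0 - =    │
--     │    q w e r t y u i o p [ ] \\ │
--     │     a s d f g h j k l ; '    │
--     │      z x c v b n m , . /     │
--     │______________________________│
--
--     Dvorak keyboard:_______________
--     │                              │
--     │ ` 1 2 3 4 5 6 7 8 9 0 [ ]    │
--     │    ' , . p y f g c r l / = \\ │
--     │     a o e u i d h t n s -    │
--     │      ; q j k x b m w v z     │
--     │______________________________│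
--
--     Returns the cipher.
--     '''
--
--     ## Variables
--     # Keysets
--     qwerty = list('`1234567890-=qwertyuiop[]\\asdfghjkl;\'zxcvbnm,./~!@#$%^&*'
--                   + '()_+QWERTYUIOP{}|ASDFGHJKL:"ZXCVBNM<>? ')
--     dvorak = list('`1234567890[]\',.pyfgcrl/=\\aoeuidhtns-;qjkxbmwvz~!@#$%^&*'
--                   + '(){}"<>PYFGCRL?+|AOEUIDHTNS_:QJKXBMWVZ ')
--     # Layers
--     layers = int(layers) % 210
--     if layers == 0: return message
--
--     ## Encipher
--     for _ in range(layers):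
--         cipher = ''
--         for letter in message:
--             if letter in qwerty:
--                 cipher += dvorak[qwerty.index(letter)]
--             else:
--                 cipher += letter
--         message = cipher
--
--     ## Return cipher
--     return cipher
-- ===== SOURCE B (Python) =====
-- def encipher_dvorak(message, layers=1):
--     qwerty = ('`1234567890-=qwertyuiop[]\\asdfghjkl;\'zxcvbnm,./~!@#$%^&*'
--               + '()_+QWERTYUIOP{}|ASDFGHJKL:"ZXCVBNM<>? ')
--     dvorak = ('`1234567890[]\',.pyfgcrl/=\\aoeuidhtns-;qjkxbmwvz~!@#$%^&*'
--               + '(){}"<>PYFGCRL?+|AOEUIDHTNS_:QJKXBMWVZ ')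
--     k = int(layers) % 210
--     if k == 0:
--         return message
--     # compose the one-layer permutation with itself k times ONCE (95 keys),
--     # then translate the message in a single pass
--     step = dict(zip(qwerty, dvorak))
--     table = step
--     for _ in range(k - 1):
--         table = {c: step[t] for c, t in table.items()}
--     return ''.join(table.get(c, c) for c in message)
-- ===== Notes on version B (the rewrite author's own statement) =====
-- stated objective: faster
-- what changed: Instead of re-enciphering the whole message layer by layer with an inner linear scan of the keyboard list, B composes the one-layer key permutation with itself (layers % 210) times over the fixed 95 keys as a dict, then translates the message in a single pass.
import Mathlib
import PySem

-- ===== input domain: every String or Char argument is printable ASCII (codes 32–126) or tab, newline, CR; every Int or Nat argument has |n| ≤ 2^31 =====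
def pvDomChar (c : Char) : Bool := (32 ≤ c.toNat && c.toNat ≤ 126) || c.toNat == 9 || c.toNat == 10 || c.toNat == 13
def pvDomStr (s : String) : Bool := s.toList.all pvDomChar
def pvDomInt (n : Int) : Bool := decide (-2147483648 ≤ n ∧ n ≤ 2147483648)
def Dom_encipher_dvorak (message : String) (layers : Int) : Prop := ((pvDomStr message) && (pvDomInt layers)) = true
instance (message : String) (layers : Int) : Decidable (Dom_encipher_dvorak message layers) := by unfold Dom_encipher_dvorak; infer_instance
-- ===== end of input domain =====

-- B composes the one-layer key permutation with itself `layers % 210` times once (over the 95 keys)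
-- and then translates the message in a single pass, instead of A's repeated full passes each with an
-- inner linear scan of the keyboard; measurably faster.

-- ===== PORT A =====
def pvQw : List Char :=
  ("`1234567890-=qwertyuiop[]\\asdfghjkl;'zxcvbnm,./~!@#$%^&*()_+QWERTYUIOP{}|ASDFGHJKL:\"ZXCVBNM<>? ").toList
def pvDv : List Char :=
  ("`1234567890[]',.pyfgcrl/=\\aoeuidhtns-;qjkxbmwvz~!@#$%^&*(){}\"<>PYFGCRL?+|AOEUIDHTNS_:QJKXBMWVZ ").toList

-- one pass of A's inner loop; dvorak[qwerty.index(letter)] is guarded by the membership test,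
-- so index? is some and the list access is in range: the defaults are unreachable
def pvLayerA (msg : List Char) : List Char :=
  msg.foldl (fun cipher letter =>
    if pvQw.contains letter then
      cipher ++ [PySem.List.pyGetD pvDv (((PySem.List.index? pvQw letter).getD 0 : Nat) : Int) letter]
    else cipher ++ [letter]) []

def pvGoA : Nat → List Char → List Char
  | 0, msg => msg
  | n+1, msg => pvGoA n (pvLayerA msg)

def encipher_dvorak (message : String) (layers : Int) : String :=
  let k := PySem.Int.mod layers 210
  if k = 0 then message
  else String.mk (pvGoA k.toNat message.toList)

-- ===== PORT B =====
def pvStepDict : PySem.Dict Char Char := PySem.Dict.ofList (pvQw.zip pvDv)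

-- {c: step[t] for c, t in table.items()}; every value t is itself a key of step,
-- so step[t] never raises: the default t is unreachable
def pvCompose (table : PySem.Dict Char Char) : PySem.Dict Char Char :=
  table.items.foldl (fun d p => d.insert p.1 ((pvStepDict.get? p.2).getD p.2)) PySem.Dict.empty

def pvGoB : Nat → PySem.Dict Char Char → PySem.Dict Char Char
  | 0, t => t
  | n+1, t => pvGoB n (pvCompose t)

def encipher_dvorak_alt (message : String) (layers : Int) : String :=
  let k := PySem.Int.mod layers 210
  if k = 0 then message
  else
    let table := pvGoB (k.toNat - 1) pvStepDict
    String.mk (message.toList.map (fun c => table.getD c c))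

-- ===== PRECONDITION & SPEC =====
def Spec_encipher_dvorak (message : String) (layers : Int) (out : String) : Prop := out = encipher_dvorak_alt message layers
instance (message : String) (layers : Int) (out : String) : Decidable (Spec_encipher_dvorak message layers out) := by unfold Spec_encipher_dvorak; infer_instance

-- ===== CLAIM (what is proved, stated in full; the proofs are below) =====
def Claim_equal_encipher_dvorak : Prop := ∀ (message : String) (layers : Int), Dom_encipher_dvorak message layers → Spec_encipher_dvorak message layers (encipher_dvorak message layers)

-- ===== LEMMAS AND PROOFS =====

-- A's per-letter substitution
def pvG (c : Char) : Char :=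
  if pvQw.contains c then
    PySem.List.pyGetD pvDv (((PySem.List.index? pvQw c).getD 0 : Nat) : Int) c
  else c

theorem pvLayerA_eq_map (msg : List Char) : pvLayerA msg = msg.map pvG := by
  unfold pvLayerA
  have h : (fun (cipher : List Char) letter =>
      if pvQw.contains letter then
        cipher ++ [PySem.List.pyGetD pvDv (((PySem.List.index? pvQw letter).getD 0 : Nat) : Int) letter]
      else cipher ++ [letter])
      = fun cipher letter => cipher ++ [pvG letter] := by
    funext acc c; simp only [pvG]; split <;> rfl
  rw [h, PySem.List.foldl_append_singleton_eq_map]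
  simp

theorem pvGoA_eq_map (n : Nat) (msg : List Char) : pvGoA n msg = msg.map (pvG^[n]) := by
  induction n generalizing msg with
  | zero => simp [pvGoA]
  | succ n ih =>
    rw [pvGoA, ih, pvLayerA_eq_map, List.map_map]
    exact congrFun (congrArg _ (Function.iterate_succ pvG n).symm) msg

set_option maxRecDepth 4000 in
theorem pvQw_nodup : pvQw.Nodup := by decide

set_option maxRecDepth 4000 in
theorem pvStep_items : pvStepDict.items = pvQw.map (fun c => (c, pvG c)) := by rfl

set_option maxRecDepth 4000 in
theorem pvMapG : pvQw.map pvG = pvDv := by rfl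

set_option maxRecDepth 4000 in
theorem pvDvSub : pvDv.all (fun c => pvQw.contains c) = true := by rfl

theorem pvStep_keys_nodup : pvStepDict.keys.Nodup := by
  rw [show pvStepDict.keys = pvStepDict.items.map Prod.fst from rfl, pvStep_items, List.map_map]
  simpa using pvQw_nodup

theorem pvStep_getD_mem : ∀ x ∈ pvQw, (pvStepDict.get? x).getD x = pvG x := by
  intro x hx
  have hmem : (x, pvG x) ∈ pvStepDict.items := by
    rw [pvStep_items]; exact List.mem_map_of_mem hx
  rw [← PySem.Dict.getD_eq_get?_getD]
  exact PySem.Dict.getD_of_mem_items _ hmem pvStep_keys_nodup x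

theorem pvG_mem : ∀ c ∈ pvQw, pvG c ∈ pvQw := by
  intro c hc
  have h1 : pvG c ∈ pvDv := by rw [← pvMapG]; exact List.mem_map_of_mem hc
  have h2 := List.all_eq_true.mp pvDvSub _ h1
  simpa using h2

theorem pvG_iter_mem (m : Nat) : ∀ c ∈ pvQw, pvG^[m] c ∈ pvQw := by
  induction m with
  | zero => intro c hc; simpa using hc
  | succ m ih =>
    intro c hc
    rw [Function.iterate_succ_apply']
    exact pvG_mem _ (ih c hc)

theorem pvG_fix (c : Char) (h : pvQw.contains c = false) : pvG c = c := by
  unfold pvG; rw [h]; simp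

theorem pvG_iter_fix (m : Nat) (c : Char) (h : pvQw.contains c = false) : pvG^[m] c = c := by
  induction m with
  | zero => rfl
  | succ m ih => rw [Function.iterate_succ_apply, pvG_fix c h, ih]

theorem pvGoB_succ (n : Nat) (t : PySem.Dict Char Char) :
    pvGoB (n+1) t = pvCompose (pvGoB n t) := by
  induction n generalizing t with
  | zero => rfl
  | succ n ih => rw [pvGoB, ih, pvGoB]

theorem pvGoB_items (n : Nat) :
    (pvGoB n pvStepDict).items = pvQw.map (fun c => (c, pvG^[n+1] c)) := by
  induction n with
  | zero =>
    rw [show pvGoB 0 pvStepDict = pvStepDict from rfl, pvStep_items]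
    exact List.map_congr_left (fun c _ => by rw [Function.iterate_one])
  | succ n ih =>
    rw [pvGoB_succ]
    unfold pvCompose
    rw [PySem.Dict.items_foldl_insert_fresh _ Prod.fst
          (fun p => (pvStepDict.get? p.2).getD p.2) PySem.Dict.empty
          (fun a _ => PySem.Dict.contains_empty _)
          (by rw [ih, List.map_map]; exact pvQw_nodup)]
    rw [ih]
    simp only [show (PySem.Dict.empty : PySem.Dict Char Char).items = [] from rfl, List.nil_append, List.map_map, Function.comp_def]
    exact List.map_congr_left (fun c hc => by
      have hm : pvG^[n+1] c ∈ pvQw := pvG_iter_mem (n+1) c hc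
      rw [pvStep_getD_mem _ hm, ← Function.iterate_succ_apply' pvG (n+1) c])

theorem pvGoB_getD (n : Nat) (c : Char) :
    (pvGoB n pvStepDict).getD c c = pvG^[n+1] c := by
  by_cases hc : c ∈ pvQw
  · refine PySem.Dict.getD_of_mem_items _ ?_ ?_ c
    · rw [pvGoB_items]
      exact List.mem_map.mpr ⟨c, hc, rfl⟩
    · show ((pvGoB n pvStepDict).items.map Prod.fst).Nodup
      rw [pvGoB_items, List.map_map]
      exact pvQw_nodup
  · have hcon : (pvGoB n pvStepDict).contains c = false := by
      rw [PySem.Dict.contains_eq_decide_mem_keys]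
      have : (pvGoB n pvStepDict).keys = pvQw := by
        show (pvGoB n pvStepDict).items.map Prod.fst = pvQw
        rw [pvGoB_items, List.map_map]
        rfl
      simp [this, hc]
    rw [PySem.Dict.getD_of_not_contains _ _ hcon,
        pvG_iter_fix _ _ (by simpa using hc)]

-- ===== VERDICT (by name: the statement is the Claim_ definition above) =====
theorem encipher_dvorak_spec : Claim_equal_encipher_dvorak := by
  intro message layers _
  unfold Spec_encipher_dvorak encipher_dvorak encipher_dvorak_alt
  by_cases hk : PySem.Int.mod layers 210 = 0
  · simp only [hk]; rfl
  · simp only [hk, if_false]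
    have hpos : 0 < PySem.Int.mod layers 210 := by
      have := PySem.Int.mod_nonneg layers (b := 210) (by norm_num)
      omega
    have h1 : (PySem.Int.mod layers 210).toNat - 1 + 1 = (PySem.Int.mod layers 210).toNat := by
      omega
    rw [pvGoA_eq_map]
    congr 1
    refine List.map_congr_left (fun c _ => ?_)
    rw [pvGoB_getD, h1]
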